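-- pv_equiv track=rewrite | github.com/Jaeyong-seo/Algorithm_test | programmers/코딩테스트/코테.py | solution
-- ===== SOURCE A (Python) =====
-- def solution(name_list):
--     answer_list = []
--     name_checklist = list(set(name_list))
--     dic = {}
--
--
--     for name in name_checklist:
--         dic[name] = 0
--
--     for name in name_list:
--         val = name + chr(65 + dic[name])
--         dic[name] += 1
--         answer_list.append(val)
--
--     return answer_list
-- ===== SOURCE B (Python) =====
-- def solution(name_list):
--     groups = {}
--     for i, name in enumerate(name_list):
--         groups.setdefault(name, []).append(i)
--     out = [""] * len(name_list)
--     for name, idxs in groups.items():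
--         for k, i in enumerate(idxs):
--             out[i] = name + chr(65 + k)
--     return out
-- ===== Notes on version B (the rewrite author's own statement) =====
-- stated objective: alternative
-- what changed: Replaced the sequential pass with a running per-name counter by a group-then-scatter strategy: one pass groups the indices of each name, then a preallocated output array is filled group by group, each occurrence's suffix being its rank within its group.
import Mathlib
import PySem

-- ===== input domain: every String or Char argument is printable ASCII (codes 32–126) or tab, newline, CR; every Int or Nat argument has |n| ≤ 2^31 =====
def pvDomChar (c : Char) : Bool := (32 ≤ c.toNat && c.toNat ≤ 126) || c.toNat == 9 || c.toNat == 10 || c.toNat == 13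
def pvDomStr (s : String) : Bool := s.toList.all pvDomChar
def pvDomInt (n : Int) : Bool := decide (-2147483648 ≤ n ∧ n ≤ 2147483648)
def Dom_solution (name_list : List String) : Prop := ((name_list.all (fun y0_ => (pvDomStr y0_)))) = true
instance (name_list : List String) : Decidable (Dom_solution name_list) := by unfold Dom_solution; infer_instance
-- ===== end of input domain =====

-- B replaces A's sequential pass with a running per-name counter by a group-then-scatter
-- strategy: group each name's indices, then fill a preallocated array group by group,
-- the suffix being the occurrence's rank inside its group (objective: alternative, not faster).

-- ===== PORT A =====
-- set(name_list) iterated only to insert the constant 0 for each key, so the Set order cannot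
-- affect any lookup; dic[name] is ported as getD _ 0, exact because every name was initialized.
def solution (name_list : List String) : List String :=
  let name_checklist : List String := PySem.Set.ofList name_list
  let dic : PySem.Dict String Int :=
    name_checklist.foldl (fun d name => d.insert name 0) PySem.Dict.empty
  let st := name_list.foldl
    (fun (st : List String × PySem.Dict String Int) name =>
      let val := name ++ String.ofList [Char.ofNat (65 + (st.2.getD name 0)).toNat]
      (st.1 ++ [val], st.2.insert name (st.2.getD name 0 + 1)))
    (([] : List String), dic)
  st.1

-- ===== PORT B =====
-- groups.setdefault(name, []).append(i) is ported as Dict.modify name [] (· ++ [i]);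
-- out[i] = … is ported as pySetD (i is provably a valid non-negative index here).
def solution_alt (name_list : List String) : List String :=
  let groups : PySem.Dict String (List Int) :=
    (PySem.List.enumerate name_list).foldl
      (fun d p => d.modify p.2 [] (fun v => v ++ [p.1])) PySem.Dict.empty
  let out : List String := List.replicate name_list.length ""
  groups.items.foldl
    (fun out q =>
      (PySem.List.enumerate q.2).foldl
        (fun out r => PySem.List.pySetD out r.2 (q.1 ++ String.ofList [Char.ofNat (65 + r.1).toNat]))
        out)
    out

-- ===== PRECONDITION & SPEC =====
def Spec_solution (name_list : List String) (out : List String) : Prop := out = solution_alt name_list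
instance (name_list : List String) (out : List String) : Decidable (Spec_solution name_list out) := by unfold Spec_solution; infer_instance

-- ===== CLAIM (what is proved, stated in full; the proofs are below) =====
def Claim_equal_solution : Prop := ∀ (name_list : List String), Dom_solution name_list → Spec_solution name_list (solution name_list)

-- ===== LEMMAS AND PROOFS =====

-- the intended value at position j: the name there, suffixed by its prefix-occurrence rank
def pvTval (l : List String) (j : Nat) : String :=
  l.getD j "" ++ String.ofList [Char.ofNat (65 + (l.take j).count (l.getD j ""))]

-- A's loop, processing `rest` with the counts of `pre` already recorded
def pvGo (pre rest : List String) : List String :=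
  match rest with
  | [] => []
  | n :: r => (n ++ String.ofList [Char.ofNat (65 + pre.count n)]) :: pvGo (pre ++ [n]) r

lemma pvDicInit (ks : List String) (d : PySem.Dict String Int)
    (h : ∀ n, d.getD n 0 = 0) :
    ∀ n, (ks.foldl (fun d name => d.insert name 0) d).getD n 0 = 0 := by
  induction ks generalizing d with
  | nil => exact h
  | cons k r ih =>
    intro n
    refine ih _ (fun m => ?_) n
    by_cases hm : m = k
    · subst hm; simp [PySem.Dict.getD_insert_self]
    · rw [PySem.Dict.getD_insert_of_ne _ _ _ hm]; exact h m

lemma pvLoopA (rest : List String) : ∀ (pre acc : List String) (d : PySem.Dict String Int),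
    (∀ n, d.getD n 0 = (pre.count n : Int)) →
    (rest.foldl
      (fun (st : List String × PySem.Dict String Int) name =>
        let val := name ++ String.ofList [Char.ofNat (65 + (st.2.getD name 0)).toNat]
        (st.1 ++ [val], st.2.insert name (st.2.getD name 0 + 1)))
      (acc, d)).1 = acc ++ pvGo pre rest := by
  induction rest with
  | nil => intro pre acc d _; simp [pvGo]
  | cons n r ih =>
    intro pre acc d hd
    simp only [List.foldl_cons]
    have h1 : (65 + d.getD n 0).toNat = 65 + pre.count n := by
      rw [hd n]; omega
    rw [pvGo]
    have := ih (pre ++ [n]) (acc ++ [n ++ String.ofList [Char.ofNat (65 + (d.getD n 0)).toNat]])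
      (d.insert n (d.getD n 0 + 1)) ?_
    · rw [this, h1, List.append_assoc]
      simp
    · intro m
      by_cases hm : m = n
      · subst hm
        rw [PySem.Dict.getD_insert_self, hd m]
        simp [List.count_append]
      · rw [PySem.Dict.getD_insert_of_ne _ _ _ hm, hd m]
        simp [List.count_append, List.count_singleton]
        exact fun h => hm h.symm

lemma pvGo_eq (rest : List String) : ∀ (pre : List String),
    pvGo pre rest = (List.range rest.length).map (fun j => pvTval (pre ++ rest) (pre.length + j)) := by
  induction rest with
  | nil => intro pre; simp [pvGo]
  | cons n r ih =>
    intro pre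
    rw [pvGo, List.length_cons, List.range_succ_eq_map, List.map_cons, List.map_map]
    refine List.cons_eq_cons.mpr ⟨?_, ?_⟩
    · have hg : (pre ++ n :: r).getD pre.length "" = n := by
        simp [List.getD_eq_getElem?_getD]
      have ht : (pre ++ n :: r).take pre.length = pre := List.take_left' rfl
      simp [pvTval, ht]
    · rw [ih (pre ++ [n])]
      apply List.map_congr_left
      intro j _
      have : pre ++ n :: r = (pre ++ [n]) ++ r := by simp
      rw [this]
      simp [Function.comp]
      ring_nf

lemma solution_eq_target (l : List String) :
    solution l = (List.range l.length).map (fun j => pvTval l j) := by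
  have hinit : ∀ n,
      ((PySem.Set.ofList l).foldl (fun d name => d.insert name 0) PySem.Dict.empty).getD n 0
        = ((([] : List String)).count n : Int) := by
    intro n
    rw [pvDicInit _ _ (fun m => rfl)]
    simp
  have hA : solution l = pvGo [] l := by
    have h := pvLoopA l [] []
      ((PySem.Set.ofList l).foldl (fun d name => d.insert name 0) PySem.Dict.empty) hinit
    simpa [solution] using h
  rw [hA, pvGo_eq l []]
  simp

-- the list of indices at which `s` occurs in `l`
def pvOcc (l : List String) (s : String) : List Int :=
  ((PySem.List.enumerate l).filter (fun p => p.2 == s)).map (·.1)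

lemma pvOcc_append (l : List String) (x s : String) :
    pvOcc (l ++ [x]) s = pvOcc l s ++ (if x = s then [(l.length : Int)] else []) := by
  unfold pvOcc
  rw [PySem.List.enumerate_append]
  by_cases hx : x = s <;> simp [PySem.List.enumerate, hx]

lemma pvOcc_spec (l : List String) (s : String) :
    (pvOcc l s).length = l.count s ∧
    ∀ (k : Nat) (i : Int), (pvOcc l s)[k]? = some i →
      ∃ j : Nat, i = (j : Int) ∧ j < l.length ∧ l.getD j "" = s ∧ (l.take j).count s = k := by
  induction l using List.reverseRecOn with
  | nil => simp [pvOcc, PySem.List.enumerate]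
  | append_singleton l x ih =>
    obtain ⟨hlen, hspec⟩ := ih
    rw [pvOcc_append]
    constructor
    · by_cases hx : x = s <;> simp [hx, hlen, List.count_append]
    · intro k i hk
      by_cases hklt : k < (pvOcc l s).length
      · rw [List.getElem?_append_left hklt] at hk
        obtain ⟨j, hij, hjlt, hgd, hcnt⟩ := hspec k i hk
        refine ⟨j, hij, by simp; omega, ?_, ?_⟩
        · simp [List.getD_eq_getElem?_getD, List.getElem?_append_left hjlt] at hgd ⊢
          exact hgd
        · rw [List.take_append_of_le_length (by omega)]
          exact hcnt
      · rw [List.getElem?_append_right (by omega)] at hk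
        by_cases hx : x = s
        · simp only [hx] at hk
          have hk0 : k - (pvOcc l s).length = 0 := by
            by_contra h0
            rw [List.getElem?_eq_none (by simp; omega)] at hk
            simp at hk
          rw [hk0] at hk
          simp at hk
          have hi := hk
          have hkeq : k = (pvOcc l s).length := by omega
          refine ⟨l.length, hi.symm, by simp, ?_, ?_⟩
          · simp [List.getD_eq_getElem?_getD]
            exact hx.symm ▸ rfl
          · rw [List.take_append_of_le_length (le_refl _), List.take_length]
            omega
        · simp [hx] at hk

lemma mem_pvOcc (l : List String) (s : String) (j : Nat) :
    (j : Int) ∈ pvOcc l s ↔ j < l.length ∧ l.getD j "" = s := by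
  constructor
  · intro hm
    obtain ⟨k, hk⟩ := List.getElem?_of_mem hm
    obtain ⟨j', hij, hjlt, hgd, _⟩ := (pvOcc_spec l s).2 k _ hk
    have : j = j' := by exact_mod_cast hij
    subst this; exact ⟨hjlt, hgd⟩
  · rintro ⟨hjlt, hgd⟩
    unfold pvOcc
    refine List.mem_map.mpr ⟨((j : Int), l[j]), ?_, rfl⟩
    refine List.mem_filter.mpr ⟨?_, ?_⟩
    · exact (PySem.List.mem_enumerate_iff _ _ _).mpr ⟨j, hjlt, by simp⟩
    · simp [List.getD_eq_getElem?_getD, List.getElem?_eq_getElem hjlt] at hgd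
      simp [hgd]

lemma pvInner (L : List String) (s : String) (idxs : List Int) :
    ∀ (k0 : Nat) (out : List String), out.length = L.length →
    (∀ (k : Nat) (i : Int), idxs[k]? = some i →
      ∃ j : Nat, i = (j : Int) ∧ j < L.length ∧ L.getD j "" = s ∧ (L.take j).count s = k0 + k) →
    let res := (PySem.List.enumerate idxs (k0 : Int)).foldl
      (fun out r => PySem.List.pySetD out r.2 (s ++ String.ofList [Char.ofNat (65 + r.1).toNat])) out
    res.length = L.length ∧
      ∀ j' : Nat, res.getD j' "" = if (j' : Int) ∈ idxs then pvTval L j' else out.getD j' "" := by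
  induction idxs with
  | nil => intro k0 out hlen _; simpa [PySem.List.enumerate] using hlen
  | cons i rest ih =>
    intro k0 out hlen hyp
    obtain ⟨j, hij, hjlt, hgd, hcnt⟩ := hyp 0 i rfl
    rw [PySem.List.enumerate_cons]
    simp only [List.foldl_cons]
    have hset : PySem.List.pySetD out i (s ++ String.ofList [Char.ofNat (65 + (k0 : Int)).toNat])
        = out.set j (pvTval L j) := by
      rw [hij, PySem.List.pySetD_natCast]
      have h1 : (65 + (k0 : Int)).toNat = 65 + k0 := by omega
      rw [h1]
      unfold pvTval
      rw [hgd, hcnt, Nat.add_zero]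
    rw [hset]
    have hcast : (k0 : Int) + 1 = ((k0 + 1 : Nat) : Int) := by push_cast; ring
    rw [hcast]
    have hyp' : ∀ (k : Nat) (i' : Int), rest[k]? = some i' →
        ∃ j2 : Nat, i' = (j2 : Int) ∧ j2 < L.length ∧ L.getD j2 "" = s ∧ (L.take j2).count s = (k0 + 1) + k := by
      intro k i' hk
      obtain ⟨j2, h1, h2, h3, h4⟩ := hyp (k + 1) i' (by simpa using hk)
      exact ⟨j2, h1, h2, h3, by omega⟩
    obtain ⟨rlen, rget⟩ := ih (k0 + 1) (out.set j (pvTval L j)) (by simp [hlen]) hyp'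
    refine ⟨rlen, ?_⟩
    intro j'
    rw [rget j']
    by_cases hm : (j' : Int) ∈ rest
    · simp [hm]
    · by_cases hji : (j' : Int) = i
      · have : j' = j := by rw [hij] at hji; exact_mod_cast hji
        subst this
        simp [hji, List.getD_eq_getElem?_getD, hlen ▸ hjlt]
      · have hne : j ≠ j' := by intro h; exact hji (h ▸ hij).symm
        simp [hm, hji, List.getD_eq_getElem?_getD, List.getElem?_set_ne hne]

lemma pvOuter (L : List String) (ns : List String) :
    ∀ (out : List String), out.length = L.length →
    let res := ns.foldl
      (fun out s =>
        (PySem.List.enumerate (pvOcc L s)).foldl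
          (fun out r => PySem.List.pySetD out r.2 (s ++ String.ofList [Char.ofNat (65 + r.1).toNat])) out)
      out
    res.length = L.length ∧
      ∀ j' : Nat, res.getD j' "" = if L.getD j' "" ∈ ns ∧ j' < L.length then pvTval L j' else out.getD j' "" := by
  induction ns with
  | nil => intro out hlen; simpa using hlen
  | cons s ns ih =>
    intro out hlen
    simp only [List.foldl_cons]
    have hyp : ∀ (k : Nat) (i : Int), (pvOcc L s)[k]? = some i →
        ∃ j : Nat, i = (j : Int) ∧ j < L.length ∧ L.getD j "" = s ∧ (L.take j).count s = 0 + k := by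
      intro k i hk
      obtain ⟨j, h1, h2, h3, h4⟩ := (pvOcc_spec L s).2 k i hk
      exact ⟨j, h1, h2, h3, by omega⟩
    have h0 : ((0 : Nat) : Int) = (0 : Int) := rfl
    obtain ⟨ilen, iget⟩ := pvInner L s (pvOcc L s) 0 out hlen hyp
    simp only [Nat.cast_zero] at ilen iget
    obtain ⟨rlen, rget⟩ := ih _ ilen
    refine ⟨rlen, ?_⟩
    intro j'
    rw [rget j', iget j']
    have hocc : (j' : Int) ∈ pvOcc L s ↔ j' < L.length ∧ L.getD j' "" = s := mem_pvOcc L s j'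
    simp only [List.mem_cons]
    split_ifs <;> first | rfl | (exfalso; tauto)

lemma pvGroups_items (l : List String) :
    ((PySem.List.enumerate l).foldl
      (fun d p => d.modify p.2 [] (fun v => v ++ [p.1])) (PySem.Dict.empty : PySem.Dict String (List Int))).items
      = (PySem.Set.ofList l).map (fun s => (s, pvOcc l s)) := by
  set G := (PySem.List.enumerate l).foldl
      (fun d p => d.modify p.2 [] (fun v => v ++ [p.1])) (PySem.Dict.empty : PySem.Dict String (List Int)) with hG
  have hnd : G.keys.Nodup := by
    rw [hG]
    exact PySem.Dict.nodup_keys_foldl_modify_key (PySem.List.enumerate l) (fun p => p.2) []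
      (fun _ p => (fun v => v ++ [p.1])) PySem.Dict.empty (by simp)
  have hkeys : G.keys = PySem.Set.ofList l := by
    rw [hG, PySem.Dict.keys_foldl_modify_key]
    rw [PySem.List.map_snd_enumerate]
    simp [PySem.Dict.keys_empty]
    rfl
  have hgetD : ∀ s, G.getD s [] = pvOcc l s := by
    intro s
    have hm : G = ((PySem.List.enumerate l).map (fun p => (p.2, p.1))).foldl
        (fun d q => d.modify q.1 [] (fun v => v ++ [q.2])) PySem.Dict.empty := by
      rw [hG, List.foldl_map]
    rw [hm, PySem.Dict.getD_foldl_modify_append]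
    rw [List.filter_map, List.map_map]
    simp only [PySem.Dict.getD_empty, List.nil_append]
    rfl
  rw [PySem.Dict.items_eq_map_keys G hnd [], hkeys]
  exact List.map_congr_left (fun s _ => by rw [hgetD s])

lemma solution_alt_eq_target (l : List String) :
    solution_alt l = (List.range l.length).map (fun j => pvTval l j) := by
  unfold solution_alt
  simp only [pvGroups_items, List.foldl_map]
  obtain ⟨rlen, rget⟩ := pvOuter l (PySem.Set.ofList l) (List.replicate l.length "") (by simp)
  refine List.ext_getElem (by simp [rlen]) ?_
  intro j h1 h2
  have hmem : l.getD j "" ∈ PySem.Set.ofList l := by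
    rw [PySem.Set.mem_ofList]
    have : j < l.length := by rw [rlen] at h1; exact h1
    simp [List.getD_eq_getElem?_getD, List.getElem?_eq_getElem this]
  have hj : j < l.length := by rw [rlen] at h1; exact h1
  have := rget j
  rw [if_pos ⟨hmem, hj⟩] at this
  calc _ = _ := (List.getD_eq_getElem _ "" h1).symm
  _ = pvTval l j := this
  _ = _ := by simp

-- ===== VERDICT (by name: the statement is the Claim_ definition above) =====
theorem solution_spec : Claim_equal_solution := by
  intro l _
  unfold Spec_solution
  rw [solution_eq_target, solution_alt_eq_target]
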